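-- pv_equiv track=rewrite | github.com/S-GroupMC/SCLONER | admin/modules/html_cleaner.py | fix_broken_attributes
-- ===== SOURCE A (Python) =====
-- def fix_broken_attributes(content: str) -> tuple:
--     """
--     Fix broken HTML attributes:
--     - href="false" → remove href or replace with #
--     - src="false", src="undefined", src="null"
--     - Empty srcset values
--
--     Returns:
--         Tuple of (modified_content, fix_count)
--     """
--     fixes = 0
--
--     # href="false" / href="undefined" / href="null" → href="#"
--     for bad_val in ['false', 'undefined', 'null', 'NaN']:
--         pattern = rf'href="{bad_val}"'
--         count = content.count(pattern)
--         if count: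
--             content = content.replace(pattern, 'href="#"')
--             fixes += count
--
--     # src="false" / src="undefined" → remove src
--     for bad_val in ['false', 'undefined', 'null', 'NaN']:
--         pattern = rf'src="{bad_val}"'
--         count = content.count(pattern)
--         if count:
--             content = content.replace(pattern, '')
--             fixes += count
--
--     return content, fixes
-- ===== SOURCE B (Python) =====
-- _REPLACEMENTS = {
--     '%s="%s"' % (attr, val): 'href="#"' if attr == 'href' else ''
--     for attr in ('href', 'src')
--     for val in ('false', 'undefined', 'null', 'NaN')
-- }
--
--
-- def fix_broken_attributes(content: str) -> tuple:
--     """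
--     Fix broken HTML attributes in a single left-to-right pass:
--     - href="false" / "undefined" / "null" / "NaN" → href="#"
--     - the same bad src values → the src attribute is removed
--
--     Returns:
--         Tuple of (modified_content, fix_count)
--     """
--     parts = []
--     fixes = 0
--     pos = 0
--     while True:
--         best = None
--         for pattern, replacement in _REPLACEMENTS.items():
--             i = content.find(pattern, pos)
--             if i != -1 and (best is None or i < best[0]):
--                 best = (i, pattern, replacement)
--         if best is None:
--             break
--         i, pattern, replacement = best
--         parts.append(content[pos:i])
--         parts.append(replacement)
--         fixes += 1
--         pos = i + len(pattern)
--     parts.append(content[pos:])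
--     return ''.join(parts), fixes
-- ===== Notes on version B (the rewrite author's own statement) =====
-- stated objective: alternative
-- what changed: B replaces A's eight count-then-replace passes by one left-to-right pass driven by a pattern->replacement table: it repeatedly finds the leftmost occurrence of any bad attribute, copies the gap, emits the replacement and continues after the match; Pre_ excludes inputs that already contain a spliced fragment where deleting one bad src attribute glues the surrounding text into a new bad attribute, a corner where chained-replace and single-pass semantics both defensibly differ.
-- outside the precondition, e.g. on fix_broken_attributes('ssrc="false"rc="null"'): A returns ('', 2), B returns ('src="null"', 1)
import Mathlib
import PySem

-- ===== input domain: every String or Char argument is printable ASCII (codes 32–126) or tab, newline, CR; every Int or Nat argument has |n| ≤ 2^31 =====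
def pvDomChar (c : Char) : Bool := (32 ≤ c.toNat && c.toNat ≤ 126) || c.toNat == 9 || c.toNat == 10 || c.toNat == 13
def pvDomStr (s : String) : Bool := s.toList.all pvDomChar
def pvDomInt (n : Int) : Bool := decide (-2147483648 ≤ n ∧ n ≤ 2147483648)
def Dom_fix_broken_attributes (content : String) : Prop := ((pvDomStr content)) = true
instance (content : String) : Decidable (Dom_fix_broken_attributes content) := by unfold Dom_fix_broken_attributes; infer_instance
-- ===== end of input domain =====

-- B replaces A's eight sequential count-then-replace passes by a single left-to-right
-- pass driven by a pattern→replacement table (find leftmost hit, copy gap, emit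
-- replacement, continue after the match); equality is proved on Pre_ below.

-- ===== PORT A =====
-- Literal port of A: two loops over the four bad values; the f-string patterns
-- 'href="{bad}"' / 'src="{bad}"' are written as the string literals they produce,
-- and «count» is written out at each of its uses.
def fix_broken_attributes (content : String) : String × Int :=
  let hrefStep : String × Int → String → String × Int := fun st pattern =>
    if PySem.Str.count st.1 pattern ≠ 0 then
      (PySem.Str.replace st.1 pattern "href=\"#\"", st.2 + (PySem.Str.count st.1 pattern : Int))
    else st
  let srcStep : String × Int → String → String × Int := fun st pattern =>
    if PySem.Str.count st.1 pattern ≠ 0 then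
      (PySem.Str.replace st.1 pattern "", st.2 + (PySem.Str.count st.1 pattern : Int))
    else st
  let st1 := ["href=\"false\"", "href=\"undefined\"", "href=\"null\"", "href=\"NaN\""].foldl hrefStep (content, 0)
  ["src=\"false\"", "src=\"undefined\"", "src=\"null\"", "src=\"NaN\""].foldl srcStep st1

-- ===== PORT B =====
-- Port of Source B.  _REPLACEMENTS: the dict comprehension written out as the association
-- list it produces, in insertion order.
def pvRulesB : List (List Char × List Char) :=
  [("href=\"false\"".toList, "href=\"#\"".toList),
   ("href=\"undefined\"".toList, "href=\"#\"".toList),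
   ("href=\"null\"".toList, "href=\"#\"".toList),
   ("href=\"NaN\"".toList, "href=\"#\"".toList),
   ("src=\"false\"".toList, []),
   ("src=\"undefined\"".toList, []),
   ("src=\"null\"".toList, []),
   ("src=\"NaN\"".toList, [])]

-- body of the «for pattern, replacement in _REPLACEMENTS.items()» loop:
-- content.find(pattern, pos) is PySem.Chars.findFrom; «i != -1 and (best is None
-- or i < best[0])» is the branch structure below.
def pvBestStep (cs : List Char) (pos : Nat) (best : Option (Int × List Char × List Char))
    (pr : List Char × List Char) : Option (Int × List Char × List Char) :=
  let i := PySem.Chars.findFrom cs pr.1 (pos : Int) none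
  if i = -1 then best
  else match best with
    | none => some (i, pr)
    | some b => if i < b.1 then some (i, pr) else best

def pvBest (cs : List Char) (pos : Nat) : Option (Int × List Char × List Char) :=
  pvRulesB.foldl (pvBestStep cs pos) none

-- the «while True» loop; fuel = |content| + 1 suffices because pos strictly grows.
-- content[pos:i] is (cs.drop pos).take (i - pos) (exact: 0 ≤ pos ≤ i ≤ len here,
-- and i = find result is nonnegative whenever it is not -1);
-- content[pos:] is cs.drop pos; parts/''.join(parts) is the appended list.
def pvFixGo (cs : List Char) : Nat → Nat → List Char × Int
  | 0, pos => (cs.drop pos, 0)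
  | fuel + 1, pos =>
    match pvBest cs pos with
    | none => (cs.drop pos, 0)
    | some (i, pat, repl) =>
      let rest := pvFixGo cs fuel (i.toNat + pat.length)
      ((cs.drop pos).take (i.toNat - pos) ++ repl ++ rest.1, rest.2 + 1)

def fix_broken_attributes_alt (content : String) : String × Int :=
  let cs := content.toList
  let res := pvFixGo cs (cs.length + 1) 0
  (String.ofList res.1, res.2)

-- ===== PRECONDITION & SPEC =====
-- the fragments whose presence lets one deleted bad src attribute glue the
-- surrounding text into a new bad attribute: 'src="' preceded by any character
-- that occurs in a bad src attribute before its closing quote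
def pvForb : List (List Char) :=
  ['"', '=', 'N', 'a', 'c', 'd', 'e', 'f', 'i', 'l', 'n', 'r', 's', 'u'].map
    (fun c => c :: "src=\"".toList)

-- Pre_ excludes inputs already containing a fragment where one bad src attribute is
-- spliced inside another, so that deleting it glues text into a new bad attribute;
-- on these A's chained replaces and B's single pass both defensibly differ.
def Pre_fix_broken_attributes (content : String) : Prop :=
  ∀ f ∈ pvForb, ¬ f <:+: content.toList
instance (content : String) : Decidable (Pre_fix_broken_attributes content) := by
  unfold Pre_fix_broken_attributes; infer_instance

def pvWitness_fix_broken_attributes : String := "<a href=\"false\">x</a><img src=\"null\">"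

def Spec_fix_broken_attributes (content : String) (out : String × Int) : Prop :=
  out = fix_broken_attributes_alt content
instance (content : String) (out : String × Int) : Decidable (Spec_fix_broken_attributes content out) := by
  unfold Spec_fix_broken_attributes; infer_instance

-- ===== CLAIM (what is proved, stated in full; the proofs are below) =====
def Claim_equal_fix_broken_attributes : Prop := ∀ (content : String), Dom_fix_broken_attributes content → Pre_fix_broken_attributes content → Spec_fix_broken_attributes content (fix_broken_attributes content)

-- ===== LEMMAS AND PROOFS =====

lemma pv_rep_nil (p r : List Char) (hp : p ≠ []) : PySem.Chars.replace [] p r = [] := by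
  simp [PySem.Chars.replace, hp, PySem.Chars.replace.go]

lemma pv_cnt_nil (p : List Char) (hp : p ≠ []) : PySem.Chars.count [] p = 0 := by
  simp [PySem.Chars.count, hp, PySem.Chars.count.go]

-- accumulator lemma
lemma pv_repgo_acc (p r : List Char) : ∀ (fuel : Nat) (l acc : List Char),
    PySem.Chars.replace.go p r fuel l acc = acc.reverse ++ PySem.Chars.replace.go p r fuel l [] := by
  intro fuel
  induction fuel with
  | zero => intro l acc; simp [PySem.Chars.replace.go]
  | succ f ih =>
    intro l acc
    cases l with
    | nil => simp [PySem.Chars.replace.go]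
    | cons c t =>
      simp only [PySem.Chars.replace.go]
      by_cases h : p.isPrefixOf (c :: t)
      · simp only [h, if_true]
        rw [ih _ (r.reverse ++ acc), ih _ (r.reverse ++ [])]
        simp
      · simp only [h, if_false]
        rw [ih _ (c :: acc), ih _ [c]]
        simp

lemma pv_cntgo_acc (p : List Char) : ∀ (fuel : Nat) (l : List Char) (acc : Nat),
    PySem.Chars.count.go p fuel l acc = acc + PySem.Chars.count.go p fuel l 0 := by
  intro fuel
  induction fuel with
  | zero => intro l acc; simp [PySem.Chars.count.go]
  | succ f ih =>
    intro l acc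
    cases l with
    | nil => simp [PySem.Chars.count.go]
    | cons c t =>
      simp only [PySem.Chars.count.go]
      by_cases h : p.isPrefixOf (c :: t)
      · simp only [h, if_true]
        rw [ih _ (acc + 1), ih _ (0 + 1)]
        omega
      · simp only [h, Bool.false_eq_true, if_false]
        exact ih t acc

-- fuel irrelevance (patterns nonempty)
lemma pv_repgo_fuel (p r : List Char) (hp : p ≠ []) : ∀ (f g : Nat) (l : List Char),
    l.length ≤ f → l.length ≤ g →
    PySem.Chars.replace.go p r f l [] = PySem.Chars.replace.go p r g l [] := by
  intro f
  induction f with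
  | zero =>
    intro g l hf hg
    have : l = [] := by cases l <;> simp_all
    subst this
    cases g <;> simp [PySem.Chars.replace.go]
  | succ f ih =>
    intro g l hf hg
    cases l with
    | nil => cases g <;> simp [PySem.Chars.replace.go]
    | cons c t =>
      cases g with
      | zero => simp at hg
      | succ g' =>
        simp only [PySem.Chars.replace.go]
        by_cases h : p.isPrefixOf (c :: t)
        · simp only [h, if_true]
          rw [pv_repgo_acc, pv_repgo_acc p r g']
          have hlen : (List.drop p.length (c :: t)).length ≤ f := by
            have : 0 < p.length := List.length_pos_iff.mpr hp
            simp only [List.length_drop, List.length_cons] at *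
            omega
          have hlen' : (List.drop p.length (c :: t)).length ≤ g' := by
            have : 0 < p.length := List.length_pos_iff.mpr hp
            simp only [List.length_drop, List.length_cons] at *
            omega
          rw [ih _ _ hlen hlen']
        · simp only [h, Bool.false_eq_true, if_false]
          rw [pv_repgo_acc p r f t [c], pv_repgo_acc p r g' t [c]]
          have hlen : t.length ≤ f := by simp at hf; omega
          have hlen' : t.length ≤ g' := by simp at hg; omega
          rw [ih _ _ hlen hlen']

lemma pv_cntgo_fuel (p : List Char) (hp : p ≠ []) : ∀ (f g : Nat) (l : List Char),
    l.length ≤ f → l.length ≤ g →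
    PySem.Chars.count.go p f l 0 = PySem.Chars.count.go p g l 0 := by
  intro f
  induction f with
  | zero =>
    intro g l hf hg
    have : l = [] := by cases l <;> simp_all
    subst this
    cases g <;> simp [PySem.Chars.count.go]
  | succ f ih =>
    intro g l hf hg
    cases l with
    | nil => cases g <;> simp [PySem.Chars.count.go]
    | cons c t =>
      cases g with
      | zero => simp at hg
      | succ g' =>
        simp only [PySem.Chars.count.go]
        by_cases h : p.isPrefixOf (c :: t)
        · simp only [h, if_true]
          rw [pv_cntgo_acc, pv_cntgo_acc p g']
          have h0 : 0 < p.length := List.length_pos_iff.mpr hp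
          have hlen : (List.drop p.length (c :: t)).length ≤ f := by
            simp only [List.length_drop, List.length_cons] at *; omega
          have hlen' : (List.drop p.length (c :: t)).length ≤ g' := by
            simp only [List.length_drop, List.length_cons] at *; omega
          rw [ih _ _ hlen hlen']
        · simp only [h, Bool.false_eq_true, if_false]
          have hlen : t.length ≤ f := by simp at hf; omega
          have hlen' : t.length ≤ g' := by simp at hg; omega
          exact ih _ _ hlen hlen'

-- unfolding lemmas at the replace/count level
lemma pv_rep_cons_neg {p : List Char} (r : List Char) {c : Char} {t : List Char}
    (hp : p ≠ []) (h : ¬ p.isPrefixOf (c :: t)) :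
    PySem.Chars.replace (c :: t) p r = c :: PySem.Chars.replace t p r := by
  simp only [PySem.Chars.replace, List.isEmpty_iff, hp, if_neg, List.length_cons]
  simp only [PySem.Chars.replace.go, h, Bool.false_eq_true, if_false]
  rw [pv_repgo_acc p r t.length t [c]]
  simp

lemma pv_rep_pos {p : List Char} (r : List Char) {s : List Char}
    (hp : p ≠ []) (h : p.isPrefixOf s) :
    PySem.Chars.replace s p r = r ++ PySem.Chars.replace (s.drop p.length) p r := by
  cases s with
  | nil =>
    have : p = [] := List.prefix_nil.mp (List.isPrefixOf_iff_prefix.mp h)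
    exact absurd this hp
  | cons c t =>
    simp only [PySem.Chars.replace, List.isEmpty_iff, hp, if_neg, List.length_cons]
    simp only [PySem.Chars.replace.go, h, if_true]
    rw [pv_repgo_acc p r t.length (List.drop p.length (c :: t)) (r.reverse ++ [])]
    simp only [List.reverse_append, List.reverse_reverse, List.reverse_nil, List.nil_append,
      List.append_nil]
    congr 1
    have h0 : 0 < p.length := List.length_pos_iff.mpr hp
    rw [pv_repgo_fuel p r hp t.length ((List.drop p.length (c :: t)).length) _
        (by simp; omega) (le_refl _)]
    simp

lemma pv_cnt_cons_neg {p : List Char} {c : Char} {t : List Char}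
    (hp : p ≠ []) (h : ¬ p.isPrefixOf (c :: t)) :
    PySem.Chars.count (c :: t) p = PySem.Chars.count t p := by
  simp only [PySem.Chars.count, List.isEmpty_iff, hp, if_neg, List.length_cons]
  simp only [PySem.Chars.count.go, h, Bool.false_eq_true, if_false]

lemma pv_cnt_pos {p : List Char} {s : List Char}
    (hp : p ≠ []) (h : p.isPrefixOf s) :
    PySem.Chars.count s p = PySem.Chars.count (s.drop p.length) p + 1 := by
  cases s with
  | nil =>
    have : p = [] := List.prefix_nil.mp (List.isPrefixOf_iff_prefix.mp h)
    exact absurd this hp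
  | cons c t =>
    simp only [PySem.Chars.count, List.isEmpty_iff, hp, if_neg, List.length_cons]
    simp only [PySem.Chars.count.go, h, if_true]
    rw [pv_cntgo_acc]
    have h0 : 0 < p.length := List.length_pos_iff.mpr hp
    rw [pv_cntgo_fuel p hp t.length ((List.drop p.length (c :: t)).length) _
        (by simp; omega) (le_refl _)]
    simp only [if_neg (by simp : ¬ False)]
    omega

-- generic prefix helpers
lemma pv_prefix_split {J A B : List Char} (h : J <+: A ++ B) :
    J <+: A ∨ ∃ J2, J = A ++ J2 ∧ J2 <+: B := by
  rcases h with ⟨u, hu⟩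
  by_cases hl : J.length ≤ A.length
  · left
    have h1 : J = (A ++ B).take J.length := by
      rw [← hu]; simp [List.take_append_of_le_length (le_refl J.length)]
    rw [List.take_append_of_le_length hl] at h1
    rw [h1]; exact List.take_prefix _ _
  · push_neg at hl
    have h1 : J = (A ++ B).take J.length := by
      rw [← hu]; simp [List.take_append_of_le_length (le_refl J.length)]
    have h2 : (A ++ B).take J.length = A ++ B.take (J.length - A.length) := by
      rw [List.take_append]
      congr 1
      rw [List.take_of_length_le (by omega)]
    refine Or.inr ⟨B.take (J.length - A.length), h1.trans h2, List.take_prefix _ _⟩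

lemma pv_pfx_cases {a b c : List Char} (h : a <+: b ++ c) : a <+: b ∨ b <+: a := by
  rcases pv_prefix_split h with h1 | ⟨J2, h2, _⟩
  · exact Or.inl h1
  · exact Or.inr ⟨J2, h2.symm⟩

-- count = 0 → replace is the identity
lemma pv_cz {p : List Char} (r : List Char) (hp : p ≠ []) :
    ∀ (n : Nat) (s : List Char), s.length ≤ n →
    PySem.Chars.count s p = 0 → PySem.Chars.replace s p r = s := by
  intro n
  induction n with
  | zero =>
    intro s hs _
    have : s = [] := by cases s <;> simp_all
    subst this; exact pv_rep_nil p r hp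
  | succ n ih =>
    intro s hs hc
    cases s with
    | nil => exact pv_rep_nil p r hp
    | cons c t =>
      by_cases h : p.isPrefixOf (c :: t)
      · rw [pv_cnt_pos hp h] at hc; omega
      · rw [pv_rep_cons_neg r hp h, pv_cnt_cons_neg hp h] at *
        rw [ih t (by simp at hs ⊢; omega) hc]

-- skipping a match-free region
lemma pv_skip {p : List Char} (r : List Char) (hp : p ≠ []) :
    ∀ (m : Nat) (s : List Char), m ≤ s.length →
    (∀ j, j < m → ¬ p.isPrefixOf (s.drop j)) →
    PySem.Chars.replace s p r = s.take m ++ PySem.Chars.replace (s.drop m) p r ∧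
    PySem.Chars.count s p = PySem.Chars.count (s.drop m) p := by
  intro m
  induction m with
  | zero => intro s _ _; simp
  | succ m ih =>
    intro s hm hj
    cases s with
    | nil => simp at hm
    | cons c t =>
      have h0 : ¬ p.isPrefixOf (c :: t) := by
        have := hj 0 (by omega); simpa using this
      have ht := ih t (by simp at hm ⊢; omega)
        (fun j hjm => by have := hj (j+1) (by omega); simpa using this)
      refine ⟨?_, ?_⟩
      · rw [pv_rep_cons_neg r hp h0, ht.1]; simp
      · rw [pv_cnt_cons_neg hp h0, ht.2]; simp

-- the single-pass scan over a rule table, as a model shared by the proofs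
def pvFirstMatch (ps : List (List Char × List Char)) (s : List Char) : Option (List Char × List Char) :=
  ps.find? (fun pr => pr.1.isPrefixOf s)

def pvScanGo (ps : List (List Char × List Char)) : Nat → List Char → List Char × Int
  | _, [] => ([], 0)
  | 0, _ :: _ => ([], 0)  -- unreachable: fuel starts at the string length
  | fuel + 1, c :: t =>
    match pvFirstMatch ps (c :: t) with
    | some (pat, repl) =>
      let rest := pvScanGo ps fuel ((c :: t).drop pat.length)
      (repl ++ rest.1, rest.2 + 1)
    | none =>
      let rest := pvScanGo ps fuel t
      (c :: rest.1, rest.2)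

def pvScan (ps : List (List Char × List Char)) (s : List Char) : List Char × Int :=
  pvScanGo ps s.length s

-- pvScan unfolding
lemma pv_scanGo_cons_some {ps : List (List Char × List Char)} {c : Char} {t pat repl : List Char}
    (f : Nat) (h : pvFirstMatch ps (c :: t) = some (pat, repl)) :
    pvScanGo ps (f + 1) (c :: t) =
      (repl ++ (pvScanGo ps f ((c :: t).drop pat.length)).1,
       (pvScanGo ps f ((c :: t).drop pat.length)).2 + 1) := by
  show (match pvFirstMatch ps (c :: t) with
    | some (pat, repl) =>
      let rest := pvScanGo ps f ((c :: t).drop pat.length)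
      (repl ++ rest.1, rest.2 + 1)
    | none => let rest := pvScanGo ps f t; (c :: rest.1, rest.2)) = _
  rw [h]

lemma pv_scanGo_cons_none {ps : List (List Char × List Char)} {c : Char} {t : List Char}
    (f : Nat) (h : pvFirstMatch ps (c :: t) = none) :
    pvScanGo ps (f + 1) (c :: t) = (c :: (pvScanGo ps f t).1, (pvScanGo ps f t).2) := by
  show (match pvFirstMatch ps (c :: t) with
    | some (pat, repl) =>
      let rest := pvScanGo ps f ((c :: t).drop pat.length)
      (repl ++ rest.1, rest.2 + 1)
    | none => let rest := pvScanGo ps f t; (c :: rest.1, rest.2)) = _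
  rw [h]

lemma pv_scanGo_fuel {ps : List (List Char × List Char)} (hne : ∀ pr ∈ ps, pr.1 ≠ []) :
    ∀ (f g : Nat) (s : List Char), s.length ≤ f → s.length ≤ g →
    pvScanGo ps f s = pvScanGo ps g s := by
  intro f
  induction f with
  | zero =>
    intro g s hf hg
    have : s = [] := by cases s <;> simp_all
    subst this; cases g <;> rfl
  | succ f ih =>
    intro g s hf hg
    cases s with
    | nil => cases g <;> rfl
    | cons c t =>
      cases g with
      | zero => simp at hg
      | succ g' =>
        cases hm : pvFirstMatch ps (c :: t) with
        | some pr =>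
          obtain ⟨pat, repl⟩ := pr
          have hmem : (pat, repl) ∈ ps := List.mem_of_find?_eq_some hm
          have hpat : pat ≠ [] := hne _ hmem
          have h1 : 0 < pat.length := List.length_pos_iff.mpr hpat
          have hlen : ((c :: t).drop pat.length).length ≤ f := by
            simp only [List.length_drop, List.length_cons] at *; omega
          have hlen' : ((c :: t).drop pat.length).length ≤ g' := by
            simp only [List.length_drop, List.length_cons] at *; omega
          rw [pv_scanGo_cons_some f hm, pv_scanGo_cons_some g' hm, ih _ _ hlen hlen']
        | none =>
          rw [pv_scanGo_cons_none f hm, pv_scanGo_cons_none g' hm,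
            ih g' t (by simp at hf ⊢; omega) (by simp at hg ⊢; omega)]

lemma pv_scan_some {ps : List (List Char × List Char)} {s pat repl : List Char}
    (hne : ∀ pr ∈ ps, pr.1 ≠ []) (h : pvFirstMatch ps s = some (pat, repl)) :
    pvScan ps s = (repl ++ (pvScan ps (s.drop pat.length)).1,
                   (pvScan ps (s.drop pat.length)).2 + 1) := by
  cases s with
  | nil =>
    exfalso
    have h' : List.find? (fun pr => pr.1.isPrefixOf ([] : List Char)) ps = some (pat, repl) := h
    have hpfx := List.find?_some (p := fun pr : List Char × List Char => pr.1.isPrefixOf []) h'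
    have hmem : (pat, repl) ∈ ps := List.mem_of_find?_eq_some h
    have : pat = [] := List.prefix_nil.mp (List.isPrefixOf_iff_prefix.mp hpfx)
    exact hne _ hmem this
  | cons c t =>
    have hmem : (pat, repl) ∈ ps := List.mem_of_find?_eq_some h
    have hpat : pat ≠ [] := hne _ hmem
    have h1 : 0 < pat.length := List.length_pos_iff.mpr hpat
    show pvScanGo ps (t.length + 1) (c :: t) = _
    rw [pv_scanGo_cons_some t.length h]
    have : pvScanGo ps t.length ((c :: t).drop pat.length)
        = pvScan ps ((c :: t).drop pat.length) := by
      apply pv_scanGo_fuel hne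
      · simp only [List.length_drop, List.length_cons]; omega
      · exact le_refl _
    rw [this]

lemma pv_scan_none {ps : List (List Char × List Char)} {c : Char} {t : List Char}
    (h : pvFirstMatch ps (c :: t) = none) :
    pvScan ps (c :: t) = (c :: (pvScan ps t).1, (pvScan ps t).2) := by
  show pvScanGo ps (t.length + 1) (c :: t) = _
  rw [pv_scanGo_cons_none t.length h]
  rfl

-- pvFirstMatch facts
lemma pv_fm_cons {p r : List Char} {ps : List (List Char × List Char)} (s : List Char) :
    pvFirstMatch ((p, r) :: ps) s =
      if p.isPrefixOf s then some (p, r) else pvFirstMatch ps s := by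
  by_cases h : p.isPrefixOf s <;> simp [pvFirstMatch, List.find?_cons, h]

lemma pv_fm_none_iff {ps : List (List Char × List Char)} {s : List Char} :
    pvFirstMatch ps s = none ↔ ∀ pr ∈ ps, ¬ pr.1 <+: s := by
  rw [pvFirstMatch, List.find?_eq_none]
  constructor
  · intro h pr hpr hp
    exact absurd (List.isPrefixOf_iff_prefix.mpr hp) (by simpa using h pr hpr)
  · intro h pr hpr
    simpa using fun hp => h pr hpr (List.isPrefixOf_iff_prefix.mp hp)

lemma pv_fm_stable : ∀ (ps : List (List Char × List Char)) (s q rq : List Char),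
    (∀ x ∈ ps.map Prod.fst, ∀ y ∈ ps.map Prod.fst, x ≠ y → ¬ x <+: y) →
    pvFirstMatch ps s = some (q, rq) → ∀ (Z : List Char),
    pvFirstMatch ps (q ++ Z) = some (q, rq) := by
  intro ps
  induction ps with
  | nil => intro s q rq _ h; simp [pvFirstMatch] at h
  | cons a ps' ih =>
    intro s q rq hPP h Z
    obtain ⟨ap, ar⟩ := a
    have hq : q <+: s := by
      have h' : ((ap, ar) :: ps').find? (fun pr => pr.1.isPrefixOf s) = some (q, rq) := h
      have hb := List.find?_some (p := fun pr : List Char × List Char => pr.1.isPrefixOf s) h'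
      exact List.isPrefixOf_iff_prefix.mp hb
    have hqm : q ∈ ((ap, ar) :: ps').map Prod.fst := by
      have := List.mem_of_find?_eq_some
        (p := fun pr : List Char × List Char => pr.1.isPrefixOf s) h
      exact List.mem_map.mpr ⟨(q, rq), this, rfl⟩
    rw [pv_fm_cons] at h ⊢
    by_cases ha : ap.isPrefixOf s
    · rw [if_pos ha] at h
      simp only [Option.some.injEq, Prod.mk.injEq] at h
      obtain ⟨rfl, rfl⟩ := h
      rw [if_pos (List.isPrefixOf_iff_prefix.mpr (List.prefix_append _ _))]
    · rw [if_neg ha] at h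
      have hne2 : ¬ ap.isPrefixOf (q ++ Z) := by
        intro hcon
        rcases pv_pfx_cases (List.isPrefixOf_iff_prefix.mp hcon) with h1 | h1
        · exact ha (List.isPrefixOf_iff_prefix.mpr (h1.trans hq))
        · by_cases heq : ap = q
          · subst heq; exact ha (List.isPrefixOf_iff_prefix.mpr hq)
          · exact hPP q hqm ap (by simp) (fun hh => heq hh.symm) h1
      rw [if_neg hne2]
      exact ih s q rq
        (fun x hx y hy hxy => hPP x (by simp [hx]) y (by simp [hy]) hxy) h Z

-- core crossing lemma: a pattern fragment matching the output of replace either matched the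
-- input, or (pure deletion) the match ran into a deleted occurrence of p, exposing a junction
lemma pv_cross {p r J : List Char} (hp : p ≠ [])
    (halt : r = [] ∨ ∀ k, 1 ≤ k → k < J.length → ¬ (J.drop k) <+: r ∧ ¬ r <+: (J.drop k)) :
    ∀ (s : List Char) (k : Nat), 1 ≤ k → k ≤ J.length →
    (J.drop k) <+: PySem.Chars.replace s p r →
    (J.drop k) <+: s ∨
      (r = [] ∧ ∃ m, k ≤ m ∧ m < J.length ∧ ((J.take m).drop k ++ p) <+: s) := by
  intro s
  induction s with
  | nil =>
    intro k _ _ hpre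
    rw [pv_rep_nil p r hp] at hpre
    left
    have : J.drop k = [] := List.prefix_nil.mp hpre
    simp [this]
  | cons c t ih =>
    intro k h1 h2 hpre
    by_cases hk : k = J.length
    · left; rw [hk, List.drop_length]; exact List.nil_prefix
    · have hklt : k < J.length := by omega
      by_cases hm : p.isPrefixOf (c :: t)
      · rcases halt with rfl | halt
        · right
          refine ⟨rfl, k, le_refl k, hklt, ?_⟩
          have he : (J.take k).drop k = [] := by
            rw [List.drop_take]; simp
          rw [he, List.nil_append]
          exact List.isPrefixOf_iff_prefix.mp hm
        · exfalso
          rw [pv_rep_pos r hp hm] at hpre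
          rcases pv_pfx_cases hpre with h3 | h3
          · exact (halt k h1 hklt).1 h3
          · exact (halt k h1 hklt).2 h3
      · rw [pv_rep_cons_neg r hp hm] at hpre
        have hdk : J.drop k = J[k] :: J.drop (k + 1) := List.drop_eq_getElem_cons hklt
        rw [hdk] at hpre
        have hc : J[k] = c ∧ (J.drop (k + 1)) <+: PySem.Chars.replace t p r := by
          rcases hpre with ⟨u, hu⟩
          simp only [List.cons_append, List.cons.injEq] at hu
          exact ⟨hu.1, ⟨u, hu.2⟩⟩
        rcases ih (k + 1) (by omega) (by omega) hc.2 with h3 | ⟨hr0, m, hm1, hm2, hm3⟩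
        · left
          rw [hdk, hc.1]
          exact List.cons_prefix_cons.mpr ⟨rfl, h3⟩
        · right
          refine ⟨hr0, m, by omega, hm2, ?_⟩
          have hsplit : (J.take m).drop k = J[k] :: (J.take m).drop (k + 1) := by
            rw [List.drop_take, List.drop_take, List.drop_eq_getElem_cons hklt]
            have : m - k = (m - (k + 1)) + 1 := by omega
            rw [this, List.take_succ_cons]
          rw [hsplit, hc.1, List.cons_append]
          exact List.cons_prefix_cons.mpr ⟨rfl, hm3⟩

-- the scan copies a region in which no pattern matches
lemma pv_scan_skip {ps : List (List Char × List Char)} (hne : ∀ pr ∈ ps, pr.1 ≠ []) :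
    ∀ (pre Z : List Char),
    (∀ j, j < pre.length → ∀ q ∈ ps.map Prod.fst, ¬ q <+: (pre.drop j ++ Z)) →
    pvScan ps (pre ++ Z) = (pre ++ (pvScan ps Z).1, (pvScan ps Z).2) := by
  intro pre
  induction pre with
  | nil => intro Z _; simp
  | cons c pre' ih =>
    intro Z hj
    have hfm : pvFirstMatch ps ((c :: pre') ++ Z) = none := by
      rw [pv_fm_none_iff]
      intro pr hpr
      have := hj 0 (by simp) pr.1 (List.mem_map.mpr ⟨pr, hpr, rfl⟩)
      simpa using this
    rw [List.cons_append, pv_scan_none (by simpa using hfm)]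
    rw [ih Z (fun j hjl q hq => by
      have := hj (j + 1) (by simp; omega) q hq
      simpa using this)]
    simp

-- the fusion lemma: one pass for (p, r) followed by scanning with the remaining rules
-- equals scanning with all rules, in the absence of junctions
lemma pv_fuse {p r : List Char} {ps : List (List Char × List Char)}
    (hp : p ≠ [])
    (hne : ∀ pr ∈ ps, pr.1 ≠ [])
    (hPP : ∀ x ∈ ((p, r) :: ps).map Prod.fst, ∀ y ∈ ((p, r) :: ps).map Prod.fst,
      x ≠ y → ¬ x <+: y)
    (hpnotin : p ∉ ps.map Prod.fst)
    (hOvl : ∀ q ∈ ps.map Prod.fst, ∀ j, 0 < j → j < q.length →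
      ¬ (q.drop j) <+: p ∧ ¬ p <+: (q.drop j))
    (hRI : ∀ q ∈ ps.map Prod.fst, ∀ j, j < r.length →
      ¬ (r.drop j) <+: q ∧ ¬ q <+: (r.drop j))
    (hG : r = [] ∨ ∀ q ∈ ps.map Prod.fst, ∀ k, 1 ≤ k → k < q.length →
      ¬ (q.drop k) <+: r ∧ ¬ r <+: (q.drop k)) :
    ∀ (n : Nat) (cs : List Char), cs.length ≤ n →
    (r = [] → ∀ q ∈ ps.map Prod.fst, ∀ k, 1 ≤ k → k < q.length →
      ¬ (q.take k ++ p) <:+: cs) →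
    pvScan ((p, r) :: ps) cs =
      ((pvScan ps (PySem.Chars.replace cs p r)).1,
       (PySem.Chars.count cs p : Int) + (pvScan ps (PySem.Chars.replace cs p r)).2) := by
  have hne' : ∀ pr ∈ (p, r) :: ps, pr.1 ≠ [] := by
    intro pr hpr
    rcases List.mem_cons.mp hpr with rfl | h
    · exact hp
    · exact hne pr h
  have hPPps : ∀ x ∈ ps.map Prod.fst, ∀ y ∈ ps.map Prod.fst, x ≠ y → ¬ x <+: y :=
    fun x hx y hy => hPP x (by simp [hx]) y (by simp [hy])
  intro n
  induction n with
  | zero =>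
    intro cs hs _
    have : cs = [] := by cases cs <;> simp_all
    subst this
    rw [pv_rep_nil p r hp, pv_cnt_nil p hp]
    show ([], (0 : Int)) = _
    simp [pvScan, pvScanGo]
  | succ n ih =>
    intro cs hs hJ
    cases cs with
    | nil =>
      rw [pv_rep_nil p r hp, pv_cnt_nil p hp]
      show ([], (0 : Int)) = _
      simp [pvScan, pvScanGo]
    | cons c0 t0 =>
      by_cases hm : p.isPrefixOf (c0 :: t0)
      · -- case 1: p matches at the head
        have hfm : pvFirstMatch ((p, r) :: ps) (c0 :: t0) = some (p, r) := by
          rw [pv_fm_cons, if_pos hm]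
        rw [pv_scan_some hne' hfm]
        rw [pv_rep_pos r hp hm, pv_cnt_pos hp hm]
        have hskip : pvScan ps (r ++ PySem.Chars.replace ((c0 :: t0).drop p.length) p r) =
            (r ++ (pvScan ps (PySem.Chars.replace ((c0 :: t0).drop p.length) p r)).1,
             (pvScan ps (PySem.Chars.replace ((c0 :: t0).drop p.length) p r)).2) := by
          apply pv_scan_skip hne
          intro j hjr q hq hcon
          rcases pv_pfx_cases hcon with h1 | h1
          · exact (hRI q hq j hjr).2 h1
          · exact (hRI q hq j hjr).1 h1
        rw [hskip]
        have hlen : ((c0 :: t0).drop p.length).length ≤ n := by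
          have : 0 < p.length := List.length_pos_iff.mpr hp
          simp only [List.length_drop, List.length_cons] at *
          omega
        have hJd : r = [] → ∀ q ∈ ps.map Prod.fst, ∀ k, 1 ≤ k → k < q.length →
            ¬ (q.take k ++ p) <:+: ((c0 :: t0).drop p.length) := by
          intro hr0 q hq k hk1 hk2 hcon
          exact hJ hr0 q hq k hk1 hk2 (hcon.trans (List.drop_suffix _ _).isInfix)
        rw [ih ((c0 :: t0).drop p.length) hlen hJd]
        simp only [Prod.mk.injEq]
        refine ⟨by trivial, by push_cast; ring⟩
      · cases hFM : pvFirstMatch ps (c0 :: t0) with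
        | some pr =>
          -- case 2: some other rule q matches at the head
          obtain ⟨q, rq⟩ := pr
          have hqpre : q <+: (c0 :: t0) := by
            have h' : List.find? (fun pr => pr.1.isPrefixOf (c0 :: t0)) ps = some (q, rq) := hFM
            have hb := List.find?_some
              (p := fun pr : List Char × List Char => pr.1.isPrefixOf (c0 :: t0)) h'
            exact List.isPrefixOf_iff_prefix.mp hb
          have hqmem : (q, rq) ∈ ps := List.mem_of_find?_eq_some hFM
          have hqfst : q ∈ ps.map Prod.fst := List.mem_map.mpr ⟨(q, rq), hqmem, rfl⟩
          have hqne : q ≠ [] := hne _ hqmem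
          have hpq : p ≠ q := fun h => hpnotin (h ▸ hqfst)
          rcases hqpre with ⟨Z0, hZ0⟩
          rw [← hZ0] at hm hFM hs hJ ⊢
          have hskipfacts : ∀ j, j < q.length → ¬ p.isPrefixOf ((q ++ Z0).drop j) := by
            intro j hjq hcon
            have hdj : (q ++ Z0).drop j = q.drop j ++ Z0 :=
              List.drop_append_of_le_length (by omega)
            rw [hdj] at hcon
            rcases pv_pfx_cases (List.isPrefixOf_iff_prefix.mp hcon) with h1 | h1
            · rcases Nat.eq_zero_or_pos j with rfl | hj0
              · simp only [List.drop_zero] at h1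
                exact hPP p (by simp) q (by simp [hqfst]) hpq h1
              · exact (hOvl q hqfst j hj0 hjq).2 h1
            · rcases Nat.eq_zero_or_pos j with rfl | hj0
              · simp only [List.drop_zero] at h1
                exact hPP q (by simp [hqfst]) p (by simp) (Ne.symm hpq) h1
              · exact (hOvl q hqfst j hj0 hjq).1 h1
          have hsk := pv_skip r hp q.length (q ++ Z0) (by simp) hskipfacts
          rw [List.take_left, List.drop_left] at hsk
          have hfmL : pvFirstMatch ((p, r) :: ps) (q ++ Z0) = some (q, rq) := by
            rw [pv_fm_cons, if_neg (by simpa using hm), hFM]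
          rw [pv_scan_some hne' hfmL, List.drop_left]
          rw [hsk.1, hsk.2]
          have hfmR := pv_fm_stable ps (q ++ Z0) q rq hPPps hFM
            (PySem.Chars.replace Z0 p r)
          rw [pv_scan_some hne hfmR, List.drop_left]
          have hlen : Z0.length ≤ n := by
            have : 0 < q.length := List.length_pos_iff.mpr hqne
            simp only [List.length_append] at hs
            omega
          have hJZ : r = [] → ∀ q' ∈ ps.map Prod.fst, ∀ k, 1 ≤ k → k < q'.length →
              ¬ (q'.take k ++ p) <:+: Z0 := by
            intro hr0 q' hq' k hk1 hk2 hcon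
            refine hJ hr0 q' hq' k hk1 hk2 ?_
            exact hcon.trans (List.IsSuffix.isInfix (⟨q, rfl⟩ : Z0 <:+ q ++ Z0))
          rw [ih Z0 hlen hJZ]
          simp only [Prod.mk.injEq]
          refine ⟨by trivial, by push_cast; ring⟩
        | none =>
          -- case 3: no rule matches at the head
          have hfmL : pvFirstMatch ((p, r) :: ps) (c0 :: t0) = none := by
            rw [pv_fm_cons, if_neg hm, hFM]
          rw [pv_scan_none hfmL]
          rw [pv_rep_cons_neg r hp (by simpa using hm), pv_cnt_cons_neg hp (by simpa using hm)]
          have hfmR : pvFirstMatch ps (c0 :: PySem.Chars.replace t0 p r) = none := by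
            rw [pv_fm_none_iff]
            intro pr hpr hcon
            obtain ⟨q, rq⟩ := pr
            have hqfst : q ∈ ps.map Prod.fst := List.mem_map.mpr ⟨(q, rq), hpr, rfl⟩
            have hqne : q ≠ [] := hne _ hpr
            cases q with
            | nil => exact hqne rfl
            | cons q0 qt =>
              rcases List.cons_prefix_cons.mp hcon with ⟨rfl, hqt⟩
              have hqt' : ((q0 :: qt).drop 1) <+: PySem.Chars.replace t0 p r := by
                simpa using hqt
              have halt : r = [] ∨ ∀ k, 1 ≤ k → k < (q0 :: qt).length →
                  ¬ ((q0 :: qt).drop k) <+: r ∧ ¬ r <+: ((q0 :: qt).drop k) := by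
                rcases hG with rfl | hG
                · exact Or.inl rfl
                · exact Or.inr (fun k hk1 hk2 => hG (q0 :: qt) hqfst k hk1 hk2)
              rcases pv_cross hp halt t0 1 (le_refl 1) (by simp) hqt'
                with h2 | ⟨hr0, m, hm1, hm2, hm3⟩
              · have hqcs : (q0 :: qt) <+: (q0 :: t0) :=
                  List.cons_prefix_cons.mpr ⟨rfl, by simpa using h2⟩
                rw [pv_fm_none_iff] at hFM
                exact hFM (q0 :: qt, rq) hpr hqcs
              · have hj : ((q0 :: qt).take m ++ p) <:+: (q0 :: t0) := by
                  have hsplit : (q0 :: qt).take m = q0 :: ((q0 :: qt).take m).drop 1 := by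
                    have hm' : m = (m - 1) + 1 := by omega
                    rw [hm', List.take_succ_cons]
                    simp
                  apply List.IsPrefix.isInfix
                  rw [hsplit, List.cons_append]
                  exact List.cons_prefix_cons.mpr ⟨rfl, hm3⟩
                exact hJ hr0 (q0 :: qt) hqfst m hm1 hm2 hj
          rw [pv_scan_none hfmR]
          have hJt : r = [] → ∀ q ∈ ps.map Prod.fst, ∀ k, 1 ≤ k → k < q.length →
              ¬ (q.take k ++ p) <:+: t0 := by
            intro hr0 q hq k hk1 hk2 hcon
            exact hJ hr0 q hq k hk1 hk2 (hcon.trans (List.suffix_cons c0 t0).isInfix)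
          rw [ih t0 (by simp at hs; omega) hJt]

-- ===== junction-freedom (pvForb) and its preservation by the passes =====

def pvNoJunk (s : List Char) : Prop := ∀ f ∈ pvForb, ¬ f <:+: s

lemma pv_forb_ne : ∀ f ∈ pvForb, f ≠ [] := by decide

lemma pv_noJunk_mono {s t : List Char} (h : t <:+: s) (hs : pvNoJunk s) : pvNoJunk t :=
  fun f hf hft => hs f hf (hft.trans h)

lemma pv_noJunk_nil : pvNoJunk [] := by
  intro f hf hinf
  exact pv_forb_ne f hf (List.eq_nil_of_infix_nil hinf)

-- a pass with any of the rules keeps the input junction-free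
lemma pv_closure (p r : List Char) (hp : p ≠ [])
    (hH : r = [] ∨ ∀ f ∈ pvForb, ∀ k ∈ List.range f.length, 1 ≤ k →
      ¬ (f.drop k) <+: r ∧ ¬ r <+: (f.drop k))
    (hDJ : r = [] → ∀ f ∈ pvForb, ∀ m ∈ List.range f.length, 1 ≤ m →
      ∃ f' ∈ pvForb, f' <:+: (f.take m ++ p))
    (hnr : ∀ f ∈ pvForb, ¬ f <:+: r)
    (hri : ∀ f ∈ pvForb, ∀ i ∈ List.range r.length, (r.drop i) <+: f →
      r.drop i = ['"'] ∧ f = '"' :: "src=\"".toList)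
    (hpq : r ≠ [] → p.dropLast ++ ['"'] = p) :
    ∀ (n : Nat) (s : List Char), s.length ≤ n → pvNoJunk s →
      pvNoJunk (PySem.Chars.replace s p r) := by
  have haltF : ∀ f ∈ pvForb, r = [] ∨ ∀ k, 1 ≤ k → k < f.length →
      ¬ (f.drop k) <+: r ∧ ¬ r <+: (f.drop k) := by
    intro f hf
    rcases hH with h | h
    · exact Or.inl h
    · exact Or.inr (fun k hk1 hk2 => h f hf k (List.mem_range.mpr hk2) hk1)
  intro n
  induction n with
  | zero =>
    intro s hs _
    have : s = [] := by cases s <;> simp_all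
    subst this
    rw [pv_rep_nil p r hp]
    exact pv_noJunk_nil
  | succ n ih =>
    intro s hs hnj
    cases s with
    | nil =>
      rw [pv_rep_nil p r hp]
      exact pv_noJunk_nil
    | cons c t =>
      by_cases hm : p.isPrefixOf (c :: t)
      · -- p matches at the head: output is r ++ replace y0 p r
        obtain ⟨y0, hy0⟩ := List.isPrefixOf_iff_prefix.mp hm
        have hdrop : (c :: t).drop p.length = y0 := by rw [← hy0, List.drop_left]
        rw [pv_rep_pos r hp hm, hdrop]
        have hy : pvNoJunk y0 :=
          pv_noJunk_mono ⟨p, [], by simp [hy0]⟩ hnj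
        have hlen : y0.length ≤ n := by
          have h1 : 0 < p.length := List.length_pos_iff.mpr hp
          have h2 : p.length + y0.length = t.length + 1 := by
            have := congrArg List.length hy0
            simpa using this
          simp at hs
          omega
        have hX := ih y0 hlen hy
        intro f hf hinf
        rcases hinf with ⟨u, v, huv⟩
        have hfv : (r ++ PySem.Chars.replace y0 p r).drop u.length = f ++ v := by
          rw [← huv, List.append_assoc, List.drop_left]
        have hfpre : f <+: (r ++ PySem.Chars.replace y0 p r).drop u.length := by
          rw [hfv]; exact ⟨v, rfl⟩
        by_cases hcmp : r.length ≤ u.length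
        · -- the match lies inside the recursive part
          have hle := hcmp
          apply hX f hf
          have hu : u <+: r ++ PySem.Chars.replace y0 p r :=
            ⟨f ++ v, by rw [← List.append_assoc]; exact huv⟩
          rcases pv_pfx_cases hu with h1 | h1
          · have hur : u = r := h1.eq_of_length (le_antisymm h1.length_le hle)
            have hXX : f ++ v = PySem.Chars.replace y0 p r := by
              have h2 : r ++ (f ++ v) = r ++ PySem.Chars.replace y0 p r := by
                rw [← List.append_assoc]
                rw [hur] at huv
                exact huv
              exact List.append_cancel_left h2
            exact ⟨[], v, by simpa using hXX⟩
          · obtain ⟨u', rfl⟩ := h1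
            have hXX : (u' ++ f) ++ v = PySem.Chars.replace y0 p r := by
              have h2 : r ++ ((u' ++ f) ++ v) = r ++ PySem.Chars.replace y0 p r := by
                rw [← huv]; simp [List.append_assoc]
              exact List.append_cancel_left h2
            exact ⟨u', v, hXX⟩
        · -- the match starts inside r
          have hlt : u.length < r.length := by omega
          have hdecomp : (r ++ PySem.Chars.replace y0 p r).drop u.length =
              r.drop u.length ++ PySem.Chars.replace y0 p r :=
            List.drop_append_of_le_length (by omega)
          rw [hdecomp] at hfpre
          rcases pv_pfx_cases hfpre with h1 | h1
          · exact hnr f hf (h1.isInfix.trans (List.drop_suffix _ _).isInfix)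
          · obtain ⟨hq1, hq2⟩ := hri f hf u.length (List.mem_range.mpr hlt) h1
            subst hq2
            rw [hq1] at hfpre
            have hS : ("src=\"".toList) <+: PySem.Chars.replace y0 p r :=
              (List.cons_prefix_cons.mp hfpre).2
            have hrne : r ≠ [] := by
              intro h0; rw [h0] at hq1; simp at hq1
            have halt := haltF ('"' :: "src=\"".toList) (by decide)
            have hcross := pv_cross hp halt y0 1 (le_refl 1) (by decide)
              (by simpa using hS)
            rcases hcross with h2 | ⟨hr0, _⟩
            · apply hnj ('"' :: "src=\"".toList) (by decide)
              obtain ⟨w, hw⟩ := (by simpa using h2 : ("src=\"".toList) <+: y0)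
              refine ⟨p.dropLast, w, ?_⟩
              have hpd := hpq hrne
              rw [show ('"' :: "src=\"".toList) = ['"'] ++ "src=\"".toList from rfl]
              simp only [← List.append_assoc]
              rw [hpd, List.append_assoc, hw, hy0]
            · exact absurd hr0 hrne
      · -- no match at the head: output is c :: replace t p r
        rw [pv_rep_cons_neg r hp hm]
        have hX : pvNoJunk (PySem.Chars.replace t p r) :=
          ih t (by simp at hs; omega) (pv_noJunk_mono (List.suffix_cons c t).isInfix hnj)
        intro f hf hinf
        rcases hinf with ⟨u, v, huv⟩
        cases u with
        | cons u0 u' =>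
          apply hX f hf
          have := huv
          simp only [List.cons_append, List.cons.injEq] at this
          exact ⟨u', v, this.2⟩
        | nil =>
          cases f with
          | nil => exact pv_forb_ne _ hf rfl
          | cons f0 f1 =>
            have huv' : f0 = c ∧ f1 ++ v = PySem.Chars.replace t p r := by
              have := huv
              simp only [List.nil_append, List.cons_append, List.cons.injEq] at this
              exact this
            have hf1 : ((f0 :: f1).drop 1) <+: PySem.Chars.replace t p r := by
              simpa using ⟨v, huv'.2⟩
            have halt := haltF (f0 :: f1) hf
            have hcross := pv_cross hp halt t 1 (le_refl 1) (by simp) hf1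
            rcases hcross with h2 | ⟨hr0, m, hm1, hm2, hm3⟩
            · apply hnj (f0 :: f1) hf
              apply List.IsPrefix.isInfix
              exact List.cons_prefix_cons.mpr ⟨huv'.1, by simpa using h2⟩
            · obtain ⟨f', hf', hfinf⟩ := hDJ hr0 (f0 :: f1) hf m (List.mem_range.mpr hm2) hm1
              apply hnj f' hf'
              have hpre2 : ((f0 :: f1).take m ++ p) <+: (c :: t) := by
                have hsplit : (f0 :: f1).take m = c :: ((f0 :: f1).take m).drop 1 := by
                  rw [show m = (m - 1) + 1 by omega, List.take_succ_cons]
                  simp [huv'.1]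
                rw [hsplit, List.cons_append]
                exact List.cons_prefix_cons.mpr ⟨rfl, hm3⟩
              exact hfinf.trans hpre2.isInfix

def pvStep (st : List Char × Int) (pr : List Char × List Char) : List Char × Int :=
  (PySem.Chars.replace st.1 pr.1 pr.2, st.2 + (PySem.Chars.count st.1 pr.1 : Int))

-- all static side conditions of one combined-scan pass
def pvStaticOK (p r : List Char) (ps : List (List Char × List Char)) : Prop :=
  p ≠ [] ∧
  (∀ pr ∈ ps, pr.1 ≠ []) ∧
  (∀ x ∈ ((p, r) :: ps).map Prod.fst, ∀ y ∈ ((p, r) :: ps).map Prod.fst,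
    x ≠ y → ¬ x <+: y) ∧
  p ∉ ps.map Prod.fst ∧
  (∀ q ∈ ps.map Prod.fst, ∀ j ∈ List.range q.length, 1 ≤ j →
    ¬ (q.drop j) <+: p ∧ ¬ p <+: (q.drop j)) ∧
  (∀ q ∈ ps.map Prod.fst, ∀ j ∈ List.range r.length,
    ¬ (r.drop j) <+: q ∧ ¬ q <+: (r.drop j)) ∧
  (r = [] ∨ ∀ q ∈ ps.map Prod.fst, ∀ k ∈ List.range q.length, 1 ≤ k →
    ¬ (q.drop k) <+: r ∧ ¬ r <+: (q.drop k)) ∧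
  (r = [] → ∀ q ∈ ps.map Prod.fst, ∀ k ∈ List.range q.length, 1 ≤ k →
    ∃ f ∈ pvForb, f <:+: (q.take k ++ p))

def pvTailOK : List (List Char × List Char) → Prop
  | [] => True
  | (p, r) :: ps => pvStaticOK p r ps

-- sequential passes equal the combined scan on junction-free input
lemma pv_chain : ∀ (RS : List (List Char × List Char)),
    (∀ tl ∈ RS.tails, pvTailOK tl) →
    (∀ pr ∈ RS, ∀ s, pvNoJunk s → pvNoJunk (PySem.Chars.replace s pr.1 pr.2)) →
    ∀ (s : List Char) (nacc : Int), pvNoJunk s →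
    RS.foldl pvStep (s, nacc) = ((pvScan RS s).1, nacc + (pvScan RS s).2) := by
  intro RS
  induction RS with
  | nil =>
    intro h1 h2 s nacc hnj
    clear hnj h1 h2
    have hnil : pvScan [] s = (s, 0) := by
      induction s with
      | nil => rfl
      | cons c t ih => rw [pv_scan_none (by rfl : pvFirstMatch [] (c :: t) = none), ih]
    rw [hnil]
    simp
  | cons hd RS' ih =>
    intro hok hpres s nacc hnj
    obtain ⟨p, r⟩ := hd
    have hS : pvStaticOK p r RS' := hok ((p, r) :: RS') (by rw [List.mem_tails])
    obtain ⟨hp, hne, hPP, hpnotin, hOvl, hRI, hG, hJF⟩ := hS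
    have hok' : ∀ tl ∈ RS'.tails, pvTailOK tl := by
      intro tl htl
      apply hok
      rw [List.mem_tails] at htl ⊢
      exact htl.trans (List.suffix_cons _ _)
    have hG' : r = [] ∨ ∀ q ∈ RS'.map Prod.fst, ∀ k, 1 ≤ k → k < q.length →
        ¬ (q.drop k) <+: r ∧ ¬ r <+: (q.drop k) := by
      rcases hG with h | h
      · exact Or.inl h
      · exact Or.inr (fun q hq k hk1 hk2 => h q hq k (List.mem_range.mpr hk2) hk1)
    have hJ : r = [] → ∀ q ∈ RS'.map Prod.fst, ∀ k, 1 ≤ k → k < q.length →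
        ¬ (q.take k ++ p) <:+: s := by
      intro hr0 q hq k hk1 hk2 hcon
      obtain ⟨f, hf, hfinf⟩ := hJF hr0 q hq k (List.mem_range.mpr hk2) hk1
      exact hnj f hf (hfinf.trans hcon)
    have hfuse := pv_fuse hp hne hPP hpnotin
      (fun q hq j hj0 hjlen => hOvl q hq j (List.mem_range.mpr hjlen) hj0)
      (fun q hq j hjlen => hRI q hq j (List.mem_range.mpr hjlen))
      hG' s.length s (le_refl _) hJ
    show List.foldl pvStep (pvStep (s, nacc) (p, r)) RS' = _
    rw [hfuse]
    show List.foldl pvStep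
      (PySem.Chars.replace s p r, nacc + (PySem.Chars.count s p : Int)) RS' = _
    rw [ih hok' (fun pr hpr => hpres pr (by simp [hpr]))
      (PySem.Chars.replace s p r) _ (hpres (p, r) (by simp) s hnj)]
    simp only [Prod.mk.injEq]
    refine ⟨by trivial, by ring⟩

-- each of the 8 rules preserves junction-freedom
set_option maxRecDepth 1000000 in
set_option maxHeartbeats 2000000 in
lemma pv_preserve : ∀ pr ∈ pvRulesB, ∀ s, pvNoJunk s →
    pvNoJunk (PySem.Chars.replace s pr.1 pr.2) := by
  intro pr hpr s hnj
  fin_cases hpr <;>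
    first
      | exact pv_closure _ _ (by decide) (Or.inr (by decide)) (fun h => absurd h (by decide))
          (by decide) (by decide) (fun _ => by decide) s.length s le_rfl hnj
      | exact pv_closure _ _ (by decide) (Or.inl rfl) (fun _ => by decide) (by decide)
          (by decide) (fun h => absurd rfl h) s.length s le_rfl hnj

set_option maxRecDepth 1000000 in
set_option maxHeartbeats 2000000 in
lemma pv_tails_ok : ∀ tl ∈ pvRulesB.tails, pvTailOK tl := by
  intro tl htl
  fin_cases htl <;> trivial

-- ===== bridge from A's String-level passes to the character-list model =====

lemma pv_step_bridge (rep : String) (st : String × Int) (pat : String)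
    (hpat : pat.toList ≠ []) :
    (((if PySem.Str.count st.1 pat ≠ 0 then
        (PySem.Str.replace st.1 pat rep, st.2 + (PySem.Str.count st.1 pat : Int))
       else st) : String × Int).1.toList,
     ((if PySem.Str.count st.1 pat ≠ 0 then
        (PySem.Str.replace st.1 pat rep, st.2 + (PySem.Str.count st.1 pat : Int))
       else st) : String × Int).2) =
    pvStep (st.1.toList, st.2) (pat.toList, rep.toList) := by
  show _ = (PySem.Chars.replace st.1.toList pat.toList rep.toList,
    st.2 + (PySem.Chars.count st.1.toList pat.toList : Int))
  rw [← PySem.Str.count_eq]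
  by_cases hc : PySem.Str.count st.1 pat = 0
  · rw [if_neg (by simpa using hc), hc]
    rw [pv_cz rep.toList hpat st.1.toList.length st.1.toList (le_refl _)
      (by rw [← PySem.Str.count_eq]; exact hc)]
    simp
  · rw [if_pos hc]
    rw [PySem.Str.toList_replace]

lemma pv_fold_bridge (rep : String) : ∀ (l : List String) (st : String × Int),
    (∀ pat ∈ l, pat.toList ≠ []) →
    (((l.foldl (fun st pattern =>
        if PySem.Str.count st.1 pattern ≠ 0 then
          (PySem.Str.replace st.1 pattern rep, st.2 + (PySem.Str.count st.1 pattern : Int))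
        else st) st)).1.toList,
     ((l.foldl (fun st pattern =>
        if PySem.Str.count st.1 pattern ≠ 0 then
          (PySem.Str.replace st.1 pattern rep, st.2 + (PySem.Str.count st.1 pattern : Int))
        else st) st)).2) =
    (l.map (fun pat => (pat.toList, rep.toList))).foldl pvStep (st.1.toList, st.2) := by
  intro l
  induction l with
  | nil => intro st _; rfl
  | cons pat l' ih =>
    intro st hne
    rw [List.map_cons, List.foldl_cons, List.foldl_cons]
    rw [ih _ (fun q hq => hne q (by simp [hq]))]
    rw [← pv_step_bridge rep st pat (hne pat (by simp))]

set_option maxRecDepth 100000 in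
set_option maxHeartbeats 1000000 in
lemma pv_A_model (content : String) :
    ((fix_broken_attributes content).1.toList, (fix_broken_attributes content).2) =
    pvRulesB.foldl pvStep (content.toList, 0) := by
  have hsplit : pvRulesB =
      (["href=\"false\"", "href=\"undefined\"", "href=\"null\"", "href=\"NaN\""].map
        (fun pat => (pat.toList, "href=\"#\"".toList))) ++
      (["src=\"false\"", "src=\"undefined\"", "src=\"null\"", "src=\"NaN\""].map
        (fun pat => (pat.toList, ("" : String).toList))) := by decide
  simp only [fix_broken_attributes]
  rw [pv_fold_bridge ""]
  · rw [pv_fold_bridge "href=\"#\""]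
    · rw [hsplit, List.foldl_append]
    · decide
  · decide

-- ===== B's find-leftmost loop equals the combined scan =====

def pvBestInv (cs : List Char) (pos : Nat) (proc : List (List Char × List Char))
    (b : Option (Int × List Char × List Char)) : Prop :=
  (b = none → ∀ pr ∈ proc, PySem.Chars.findFrom cs pr.1 (pos : Int) none = -1) ∧
  (∀ i pat repl, b = some (i, pat, repl) →
    (pat, repl) ∈ proc ∧ PySem.Chars.findFrom cs pat (pos : Int) none = i ∧ i ≠ -1 ∧
    ∀ pr ∈ proc, PySem.Chars.findFrom cs pr.1 (pos : Int) none = -1 ∨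
      i ≤ PySem.Chars.findFrom cs pr.1 (pos : Int) none)

lemma pv_best_fold (cs : List Char) (pos : Nat) :
    ∀ (l proc : List (List Char × List Char)) (b : Option (Int × List Char × List Char)),
    pvBestInv cs pos proc b →
    pvBestInv cs pos (proc ++ l) (l.foldl (pvBestStep cs pos) b) := by
  intro l
  induction l with
  | nil => intro proc b h; simpa using h
  | cons pr l' ihl =>
    intro proc b hInv
    have hstep : pvBestInv cs pos (proc ++ [pr]) (pvBestStep cs pos b pr) := by
      obtain ⟨hn, hs⟩ := hInv
      unfold pvBestStep
      set i := PySem.Chars.findFrom cs pr.1 (pos : Int) none with hi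
      by_cases h1 : i = -1
      · rw [if_pos h1]
        constructor
        · intro hb q hq
          rcases List.mem_append.mp hq with hq | hq
          · exact hn hb q hq
          · simp only [List.mem_singleton] at hq; subst hq; exact h1
        · intro j pat repl hb
          obtain ⟨hm, hf, hne, hmin⟩ := hs j pat repl hb
          refine ⟨List.mem_append.mpr (Or.inl hm), hf, hne, ?_⟩
          intro q hq
          rcases List.mem_append.mp hq with hq | hq
          · exact hmin q hq
          · simp only [List.mem_singleton] at hq; subst hq; exact Or.inl h1
      · rw [if_neg h1]
        cases b with
        | none =>
          constructor
          · intro hb; simp at hb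
          · intro j pat repl hb
            simp only [Option.some.injEq, Prod.mk.injEq] at hb
            obtain ⟨rfl, rfl⟩ := hb
            refine ⟨List.mem_append.mpr (Or.inr (by simp)), rfl, h1, ?_⟩
            intro q hq
            rcases List.mem_append.mp hq with hq | hq
            · exact Or.inl (hn rfl q hq)
            · simp only [List.mem_singleton] at hq; subst hq; exact Or.inr (le_refl _)
        | some bb =>
          show pvBestInv cs pos (proc ++ [pr]) (if i < bb.1 then some (i, pr) else some bb)
          by_cases h2 : i < bb.1
          · rw [if_pos h2]
            constructor
            · intro hb; simp at hb
            · intro j pat repl hb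
              simp only [Option.some.injEq, Prod.mk.injEq] at hb
              obtain ⟨rfl, rfl⟩ := hb
              obtain ⟨hm, hf, hne, hmin⟩ := hs bb.1 bb.2.1 bb.2.2 rfl
              refine ⟨List.mem_append.mpr (Or.inr (by simp)), rfl, h1, ?_⟩
              intro q hq
              rcases List.mem_append.mp hq with hq | hq
              · rcases hmin q hq with h | h
                · exact Or.inl h
                · exact Or.inr (le_trans (le_of_lt h2) h)
              · simp only [List.mem_singleton] at hq; subst hq; exact Or.inr (le_refl _)
          · rw [if_neg h2]
            constructor
            · intro hb; simp at hb
            · intro j pat repl hb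
              obtain ⟨hm, hf, hne, hmin⟩ := hs j pat repl hb
              refine ⟨List.mem_append.mpr (Or.inl hm), hf, hne, ?_⟩
              intro q hq
              rcases List.mem_append.mp hq with hq | hq
              · exact hmin q hq
              · simp only [List.mem_singleton] at hq; subst hq
                right
                have : j = bb.1 := by
                  have := hs j pat repl hb
                  cases hb
                  rfl
                omega
    have := ihl (proc ++ [pr]) (pvBestStep cs pos b pr) hstep
    simpa [List.append_assoc] using this

lemma pv_best_none_spec {cs : List Char} {pos : Nat} (hpos : pos ≤ cs.length)
    (h : pvBest cs pos = none) :
    ∀ j, pos ≤ j → ∀ pr ∈ pvRulesB, ¬ pr.1 <+: cs.drop j := by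
  have hInv0 : pvBestInv cs pos [] none :=
    ⟨fun _ pr h => absurd h (List.not_mem_nil), fun i pat repl h => by simp at h⟩
  have hInv := pv_best_fold cs pos pvRulesB [] none hInv0
  rw [List.nil_append] at hInv
  intro j hj pr hpr hcon
  have hm1 := hInv.1 h pr hpr
  have : ¬ pr.1 <:+: cs.drop pos :=
    (PySem.Chars.findFrom_natCast_eq_neg_one_iff cs pr.1 pos hpos).mp hm1
  apply this
  have : cs.drop j = (cs.drop pos).drop (j - pos) := by
    rw [List.drop_drop]
    congr 1
    omega
  rw [this] at hcon
  exact hcon.isInfix.trans (List.drop_suffix _ _).isInfix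

lemma pv_best_some_spec {cs : List Char} {pos : Nat} {i : Int} {pat repl : List Char}
    (hpos : pos ≤ cs.length) (h : pvBest cs pos = some (i, pat, repl)) :
    (pat, repl) ∈ pvRulesB ∧ pos ≤ i.toNat ∧ i.toNat = i ∧ pat <+: cs.drop i.toNat ∧
    ∀ j, pos ≤ j → j < i.toNat → ∀ pr ∈ pvRulesB, ¬ pr.1 <+: cs.drop j := by
  have hInv0 : pvBestInv cs pos [] none :=
    ⟨fun _ pr h => absurd h (List.not_mem_nil), fun i pat repl h => by simp at h⟩
  have hInv := pv_best_fold cs pos pvRulesB [] none hInv0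
  rw [List.nil_append] at hInv
  obtain ⟨hmem, hf, hne, hmin⟩ := hInv.2 i pat repl h
  have hspec := PySem.Chars.findFrom_natCast_spec cs pat pos hpos (by rw [hf]; exact hne)
  rw [hf] at hspec
  obtain ⟨hle, hpre, hmin1⟩ := hspec
  have h0i : 0 ≤ i := le_trans (by positivity) hle
  have htn : (i.toNat : Int) = i := Int.toNat_of_nonneg h0i
  have hposi : pos ≤ i.toNat := by omega
  refine ⟨hmem, hposi, htn, hpre, ?_⟩
  intro j hj hji pr hpr hcon
  rcases hmin pr hpr with hq | hq
  · have : ¬ pr.1 <:+: cs.drop pos :=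
      (PySem.Chars.findFrom_natCast_eq_neg_one_iff cs pr.1 pos hpos).mp hq
    apply this
    have hdj : cs.drop j = (cs.drop pos).drop (j - pos) := by
      rw [List.drop_drop]; congr 1; omega
    rw [hdj] at hcon
    exact hcon.isInfix.trans (List.drop_suffix _ _).isInfix
  · have hq' : PySem.Chars.findFrom cs pr.1 (pos : Int) none ≠ -1 := by
      intro hz; rw [hz] at hq; omega
    have hspec' := PySem.Chars.findFrom_natCast_spec cs pr.1 pos hpos hq'
    obtain ⟨hle', hpre', hmin1'⟩ := hspec'
    have : j < (PySem.Chars.findFrom cs pr.1 (pos : Int) none).toNat := by omega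
    exact hmin1' j hj this hcon

lemma pv_firstMatch_unique {u pat repl : List Char}
    (hmem : (pat, repl) ∈ pvRulesB) (hpre : pat <+: u)
    (huniq : ∀ pr ∈ pvRulesB, pr.1 <+: u → pr = (pat, repl)) :
    pvFirstMatch pvRulesB u = some (pat, repl) := by
  have gen : ∀ (ps : List (List Char × List Char)), (pat, repl) ∈ ps →
      (∀ pr ∈ ps, pr.1 <+: u → pr = (pat, repl)) → pvFirstMatch ps u = some (pat, repl) := by
    intro ps
    induction ps with
    | nil => intro h _; simp at h
    | cons a ps' ih =>
      intro hmem' huniq'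
      by_cases ha : a.1.isPrefixOf u
      · have haeq : a = (pat, repl) := huniq' a (by simp) (List.isPrefixOf_iff_prefix.mp ha)
        subst haeq
        simp [pvFirstMatch, ha]
      · have hmem'' : (pat, repl) ∈ ps' := by
          rcases List.mem_cons.mp hmem' with h | h
          · exfalso; apply ha; rw [← h]; exact List.isPrefixOf_iff_prefix.mpr hpre
          · exact h
        rw [pvFirstMatch, List.find?_cons_of_neg (by simpa using ha)]
        exact ih hmem'' (fun pr hpr hp => huniq' pr (by simp [hpr]) hp)
  exact gen pvRulesB hmem huniq

lemma pv_go_eq_scan (cs : List Char) :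
    ∀ (fuel pos : Nat), pos ≤ cs.length → cs.length - pos < fuel →
    pvFixGo cs fuel pos = pvScan pvRulesB (cs.drop pos) := by
  have hne : ∀ pr ∈ pvRulesB, pr.1 ≠ [] := by decide
  have hPP : ∀ x ∈ pvRulesB.map Prod.fst, ∀ y ∈ pvRulesB.map Prod.fst, x ≠ y → ¬ x <+: y := by
    decide
  have hfst : ∀ pr ∈ pvRulesB, ∀ pr' ∈ pvRulesB, pr.1 = pr'.1 → pr = pr' := by decide
  intro fuel
  induction fuel with
  | zero => intro pos h1 h2; omega
  | succ fuel ih =>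
    intro pos hpos hfuel
    cases hb : pvBest cs pos with
    | none =>
      have hnom := pv_best_none_spec hpos hb
      have hgo : pvFixGo cs (fuel + 1) pos = (cs.drop pos, 0) := by
        simp [pvFixGo, hb]
      have hsc : pvScan pvRulesB (cs.drop pos ++ []) =
          (cs.drop pos ++ (pvScan pvRulesB []).1, (pvScan pvRulesB []).2) := by
        apply pv_scan_skip hne
        intro j hj q hq hcon
        obtain ⟨pr, hpr, rfl⟩ := List.mem_map.mp hq
        apply hnom (pos + j) (by omega) pr hpr
        rw [List.append_nil, List.drop_drop] at hcon
        exact hcon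
      rw [List.append_nil] at hsc
      rw [hgo, hsc]
      simp [pvScan, pvScanGo]
    | some b =>
      obtain ⟨i, pat, repl⟩ := b
      obtain ⟨hmem, hposi, htn, hpre, hmin⟩ := pv_best_some_spec hpos hb
      have hpat : pat ≠ [] := hne _ hmem
      have hpl : 0 < pat.length := List.length_pos_iff.mpr hpat
      have hplen : pat.length ≤ cs.length - i.toNat := by
        have := hpre.length_le
        simpa using this
      have hit : i.toNat < cs.length := by omega
      have hpos' : i.toNat + pat.length ≤ cs.length := by omega
      have hIH := ih (i.toNat + pat.length) hpos' (by omega)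
      have hgo : pvFixGo cs (fuel + 1) pos =
          ((cs.drop pos).take (i.toNat - pos) ++ repl ++ (pvFixGo cs fuel (i.toNat + pat.length)).1,
           (pvFixGo cs fuel (i.toNat + pat.length)).2 + 1) := by
        simp [pvFixGo, hb]
      have hdropit : (cs.drop pos).drop (i.toNat - pos) = cs.drop i.toNat := by
        rw [List.drop_drop]; congr 1; omega
      have hsplit : (cs.drop pos).take (i.toNat - pos) ++ cs.drop i.toNat = cs.drop pos := by
        rw [← hdropit]; exact List.take_append_drop _ _
      have hgaplen : ((cs.drop pos).take (i.toNat - pos)).length = i.toNat - pos := by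
        simp
        omega
      have hskip : pvScan pvRulesB ((cs.drop pos).take (i.toNat - pos) ++ cs.drop i.toNat) =
          ((cs.drop pos).take (i.toNat - pos) ++ (pvScan pvRulesB (cs.drop i.toNat)).1,
           (pvScan pvRulesB (cs.drop i.toNat)).2) := by
        apply pv_scan_skip hne
        intro j hj q hq hcon
        obtain ⟨pr, hpr, rfl⟩ := List.mem_map.mp hq
        rw [hgaplen] at hj
        apply hmin (pos + j) (by omega) (by omega) pr hpr
        have h2 : ((cs.drop pos).take (i.toNat - pos)).drop j ++ cs.drop i.toNat =
            (cs.drop pos).drop j := by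
          conv_rhs => rw [← hsplit]
          rw [List.drop_append_of_le_length (by rw [hgaplen]; omega)]
        rw [h2, List.drop_drop] at hcon
        exact hcon
      have huniq : ∀ pr ∈ pvRulesB, pr.1 <+: cs.drop i.toNat → pr = (pat, repl) := by
        intro pr hpr hp
        by_cases heq : pr.1 = pat
        · exact hfst pr hpr (pat, repl) hmem heq
        · exfalso
          rcases List.prefix_or_prefix_of_prefix hp hpre with h | h
          · exact hPP pr.1 (List.mem_map.mpr ⟨pr, hpr, rfl⟩)
              pat (List.mem_map.mpr ⟨(pat, repl), hmem, rfl⟩) heq h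
          · exact hPP pat (List.mem_map.mpr ⟨(pat, repl), hmem, rfl⟩)
              pr.1 (List.mem_map.mpr ⟨pr, hpr, rfl⟩) (fun hh => heq hh.symm) h
      have hfm := pv_firstMatch_unique hmem hpre huniq
      have hsome := pv_scan_some hne hfm
      have hdrop2 : (cs.drop i.toNat).drop pat.length = cs.drop (i.toNat + pat.length) := by
        rw [List.drop_drop]
      rw [hdrop2] at hsome
      conv_rhs => rw [← hsplit]
      rw [hskip, hsome, hgo, hIH]
      simp [List.append_assoc]

lemma pv_main : ∀ (content : String), Pre_fix_broken_attributes content →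
    fix_broken_attributes content = fix_broken_attributes_alt content := by
  intro content hpre
  have hnj : pvNoJunk content.toList := fun f hf => hpre f hf
  have hmodel := pv_A_model content
  rw [pv_chain pvRulesB pv_tails_ok pv_preserve content.toList 0 hnj, zero_add] at hmodel
  have hgo := pv_go_eq_scan content.toList (content.toList.length + 1) 0 (by omega) (by omega)
  rw [List.drop_zero] at hgo
  rw [Prod.mk.injEq] at hmodel
  obtain ⟨h1, h2⟩ := hmodel
  have halt : fix_broken_attributes_alt content =
      (String.ofList (pvFixGo content.toList (content.toList.length + 1) 0).1,
       (pvFixGo content.toList (content.toList.length + 1) 0).2) := rfl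
  rw [halt, hgo]
  have hfst : (fix_broken_attributes content).1
      = String.ofList (pvScan pvRulesB content.toList).1 := by
    rw [← h1, String.ofList_toList]
  exact Prod.ext hfst h2

-- ===== VERDICT (by name: the statement is the Claim_ definition above) =====
theorem fix_broken_attributes_spec : Claim_equal_fix_broken_attributes := by
  intro content _ hpre
  exact pv_main content hpre
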